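-- pv_equiv track=rewrite | github.com/CheapNightbot/yutify | utils/replace.py | replace_after_half
-- ===== SOURCE A (Python) =====
-- def replace_after_half(text: str, replace: str = "x") -> str:
--     """Replace a given string with "x" or user provided string after half of it's length, except "."
--
--     Args:
--         text (str): Any string.
--         replace (str, optional): String to replce with. Defaults to "x".
--
--     Returns:
--         str: Modified string with characters being replaced with "x" or provided `replace` after the half length of string.
--     """
--     result = ""
--
--     half_index = len(text) // 2
--
--     for i, char in enumerate(text):
--         if i >= half_index and char != ".":
--             result += replace
--
--         else:
--             result += char
--
--     return result
-- ===== SOURCE B (Python) =====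
-- def replace_after_half(text: str, replace: str = "x") -> str:
--     half = len(text) // 2
--     return text[:half] + "".join(replace if c != "." else c for c in text[half:])
-- ===== Notes on version B (the rewrite author's own statement) =====
-- stated objective: simpler
-- what changed: Replaces the indexed loop with a per-character comparison against the midpoint by a bulk copy of the untouched first half (slice) plus a single-condition join over the tail slice.
import Mathlib
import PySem

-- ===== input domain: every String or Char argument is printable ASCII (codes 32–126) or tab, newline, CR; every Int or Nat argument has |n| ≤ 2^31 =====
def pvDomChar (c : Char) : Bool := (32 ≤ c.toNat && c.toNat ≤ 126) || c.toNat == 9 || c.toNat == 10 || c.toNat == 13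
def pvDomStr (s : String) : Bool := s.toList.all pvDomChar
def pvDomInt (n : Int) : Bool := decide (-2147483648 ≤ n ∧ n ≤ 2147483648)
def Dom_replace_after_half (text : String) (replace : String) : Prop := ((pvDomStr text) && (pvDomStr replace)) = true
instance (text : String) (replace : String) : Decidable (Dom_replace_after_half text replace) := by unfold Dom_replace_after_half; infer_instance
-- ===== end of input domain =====

-- B replaces A's indexed loop (per-character midpoint comparison) by a bulk copy of the
-- first half plus a single-condition pass over the tail slice; objective: simpler.

-- ===== PORT A =====
-- result = ""; half_index = len(text) // 2; for i, char in enumerate(text): …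
def replace_after_half (text : String) (replace : String) : String :=
  let half_index : Int := PySem.Int.floordiv (PySem.Str.len text) 2
  let result : List Char :=
    (PySem.List.enumerate text.toList 0).foldl
      (fun result ic =>
        if half_index ≤ ic.1 ∧ ic.2 ≠ '.' then result ++ replace.toList
        else result ++ [ic.2]) []
  String.mk result

-- ===== PORT B =====
-- half = len(text)//2; text[:half] + "".join(replace if c != "." else c for c in text[half:])
def replace_after_half_alt (text : String) (replace : String) : String :=
  let half : Int := PySem.Int.floordiv (PySem.Str.len text) 2
  let cs := text.toList
  String.mk (PySem.List.slice cs none (some half) ++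
    (PySem.List.slice cs (some half) none).flatMap
      (fun c => if c ≠ '.' then replace.toList else [c]))

-- ===== PRECONDITION & SPEC =====
def Spec_replace_after_half (text : String) (replace : String) (out : String) : Prop := out = replace_after_half_alt text replace
instance (text : String) (replace : String) (out : String) : Decidable (Spec_replace_after_half text replace out) := by unfold Spec_replace_after_half; infer_instance

-- ===== CLAIM (what is proved, stated in full; the proofs are below) =====
def Claim_equal_replace_after_half : Prop := ∀ (text : String) (replace : String), Dom_replace_after_half text replace → Spec_replace_after_half text replace (replace_after_half text replace)

-- ===== LEMMAS AND PROOFS =====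

-- flatMap over the enumerated prefix whose indices all lie below the threshold is the identity
theorem pv_flatMap_lt (R : List Char) (l : List Char) :
    ∀ (s H : Int), s + l.length ≤ H →
      (PySem.List.enumerate l s).flatMap
        (fun ic => if H ≤ ic.1 ∧ ic.2 ≠ '.' then R else [ic.2]) = l := by
  induction l with
  | nil => intro s H _; simp [PySem.List.enumerate_nil]
  | cons x xs ih =>
    intro s H hle
    simp only [PySem.List.enumerate_cons, List.flatMap_cons, List.length_cons] at *
    rw [if_neg (by push_cast at hle ⊢; omega), ih (s + 1) H (by push_cast at hle ⊢; omega)]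
    simp

-- flatMap over the enumerated suffix whose indices all reach the threshold drops the index test
theorem pv_flatMap_ge (R : List Char) (l : List Char) :
    ∀ (s H : Int), H ≤ s →
      (PySem.List.enumerate l s).flatMap
        (fun ic => if H ≤ ic.1 ∧ ic.2 ≠ '.' then R else [ic.2]) =
      l.flatMap (fun c => if c ≠ '.' then R else [c]) := by
  induction l with
  | nil => intro s H _; simp [PySem.List.enumerate_nil]
  | cons x xs ih =>
    intro s H hle
    simp only [PySem.List.enumerate_cons, List.flatMap_cons]
    rw [ih (s + 1) H (by omega)]
    by_cases hx : x = '.'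
    · simp [hx]
    · simp [hx, hle]

-- ===== VERDICT (by name: the statement is the Claim_ definition above) =====
theorem replace_after_half_spec : Claim_equal_replace_after_half := by
  intro text replace _
  unfold Spec_replace_after_half replace_after_half replace_after_half_alt
  set l := text.toList with hl
  set h : Nat := l.length / 2 with hh
  have hlen : PySem.Str.len text = (l.length : Int) := by
    simp [PySem.Str.len, hl]
  have hfd : PySem.Int.floordiv (PySem.Str.len text) 2 = (h : Int) := by
    rw [hlen]
    exact_mod_cast PySem.Int.floordiv_natCast l.length 2
  simp only [hfd]
  have hbody : (fun (result : List Char) (ic : Int × Char) =>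
        if (h : Int) ≤ ic.1 ∧ ic.2 ≠ '.' then result ++ replace.toList else result ++ [ic.2]) =
      (fun result ic => result ++
        (fun ic : Int × Char => if (h : Int) ≤ ic.1 ∧ ic.2 ≠ '.' then replace.toList else [ic.2]) ic) := by
    funext r ic; beta_reduce; split_ifs <;> rfl
  rw [hbody, PySem.List.foldl_append_eq_flatMap, PySem.List.slice_to_natCast,
      PySem.List.slice_from_natCast]
  have hsplit : l = l.take h ++ l.drop h := (List.take_append_drop h l).symm
  rw [show PySem.List.enumerate l 0 =
        PySem.List.enumerate (l.take h) 0 ++ PySem.List.enumerate (l.drop h) (0 + (l.take h).length) by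
        rw [← PySem.List.enumerate_append, ← hsplit]]
  rw [List.flatMap_append]
  have htk : (l.take h).length = h := List.length_take_of_le (Nat.div_le_self _ _)
  rw [pv_flatMap_lt replace.toList (l.take h) 0 (h : Int) (by rw [htk]; omega),
      pv_flatMap_ge replace.toList (l.drop h) (0 + (l.take h).length : Int) (h : Int)
        (by rw [htk]; omega)]
  simp
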